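-- pv_equiv track=rewrite | github.com/babyview-project/object-detection | preprocessing/make_category_rsa_from_doc.py | sort_categories
-- ===== SOURCE A (Python) =====
-- def sort_categories(categories, category_types):
--     """Sort categories by type (animate -> bodypart -> place -> big -> small -> others)"""
--     # Create category groups
--     animate = []
--     bodypart = []
--     place = []
--     big = []
--     small = []
--     others = []
--
--     for cat in categories:
--         if cat not in category_types:
--             others.append(cat)
--             continue
--
--         types = category_types[cat]
--         if types['is_animate']:
--             animate.append(cat)
--         elif types['is_bodypart']:
--             bodypart.append(cat)
--         elif types['is_place']:
--             place.append(cat)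
--         elif types['is_big']:
--             big.append(cat)
--         elif types['is_small']:
--             small.append(cat)
--         else:
--             others.append(cat)
--
--     # Sort within each group alphabetically
--     return sorted(animate) + sorted(bodypart) + sorted(place) + sorted(big) + sorted(small) + sorted(others)
-- ===== SOURCE B (Python) =====
-- def sort_categories(categories, category_types):
--     """Sort categories by type (animate -> bodypart -> place -> big -> small -> others)"""
--     def rank(cat):
--         t = category_types.get(cat)
--         if t is None:
--             return 5
--         if t['is_animate']:
--             return 0
--         if t['is_bodypart']:
--             return 1
--         if t['is_place']:
--             return 2
--         if t['is_big']:
--             return 3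
--         if t['is_small']:
--             return 4
--         return 5
--     return sorted(categories, key=lambda cat: (rank(cat), cat))
-- ===== Notes on version B (the rewrite author's own statement) =====
-- stated objective: idiomatic
-- what changed: Replaces the six explicit bucket lists plus six separate sorts with a rank function (0-5 following the same priority cascade) and one keyed sorted(categories, key=(rank(cat), cat)); rank ties broken by name reproduce the per-bucket alphabetical order.
import Mathlib
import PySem

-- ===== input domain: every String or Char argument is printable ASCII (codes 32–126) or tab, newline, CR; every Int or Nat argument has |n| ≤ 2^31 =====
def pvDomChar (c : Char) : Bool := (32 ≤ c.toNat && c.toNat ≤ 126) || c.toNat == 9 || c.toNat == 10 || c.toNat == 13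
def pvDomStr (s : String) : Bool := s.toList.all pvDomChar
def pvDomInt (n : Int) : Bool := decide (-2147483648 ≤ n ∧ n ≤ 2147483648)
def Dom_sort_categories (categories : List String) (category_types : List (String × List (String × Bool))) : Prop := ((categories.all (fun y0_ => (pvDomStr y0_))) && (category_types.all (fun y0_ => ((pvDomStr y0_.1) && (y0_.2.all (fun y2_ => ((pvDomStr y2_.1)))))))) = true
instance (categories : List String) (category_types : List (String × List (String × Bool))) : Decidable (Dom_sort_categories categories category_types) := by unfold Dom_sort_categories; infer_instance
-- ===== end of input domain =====

-- B replaces A's six explicit buckets + six separate sorts with one keyed sort by (rank, name);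
-- same return value on every input admitted by Pre_ (where A's dict lookups all succeed).

-- ===== PORT A =====
-- the body of A's for-loop: append cat to the bucket chosen by the elif cascade
def stepA (category_types : List (String × List (String × Bool)))
    (acc : List String × List String × List String × List String × List String × List String)
    (cat : String) :
    List String × List String × List String × List String × List String × List String :=
  match acc with
  | (an, bp, pl, bg, sm, ot) =>
    match PySem.Dict.get? (PySem.Dict.mk category_types) cat with
    | none => (an, bp, pl, bg, sm, ot ++ [cat])      -- cat not in category_types
    | some types =>
      if PySem.Dict.getD (PySem.Dict.mk types) "is_animate" false then (an ++ [cat], bp, pl, bg, sm, ot)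
      else if PySem.Dict.getD (PySem.Dict.mk types) "is_bodypart" false then (an, bp ++ [cat], pl, bg, sm, ot)
      else if PySem.Dict.getD (PySem.Dict.mk types) "is_place" false then (an, bp, pl ++ [cat], bg, sm, ot)
      else if PySem.Dict.getD (PySem.Dict.mk types) "is_big" false then (an, bp, pl, bg ++ [cat], sm, ot)
      else if PySem.Dict.getD (PySem.Dict.mk types) "is_small" false then (an, bp, pl, bg, sm ++ [cat], ot)
      else (an, bp, pl, bg, sm, ot ++ [cat])

def sort_categories (categories : List String) (category_types : List (String × List (String × Bool))) : List String :=
  match categories.foldl (stepA category_types) ([], [], [], [], [], []) with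
  | (an, bp, pl, bg, sm, ot) =>
    PySem.List.sorted an (fun x => x) false ++ PySem.List.sorted bp (fun x => x) false ++
    PySem.List.sorted pl (fun x => x) false ++ PySem.List.sorted bg (fun x => x) false ++
    PySem.List.sorted sm (fun x => x) false ++ PySem.List.sorted ot (fun x => x) false

-- ===== PORT B =====
-- B's rank: 0..5 by the same priority cascade; 5 for categories absent from category_types
def rank_alt (category_types : List (String × List (String × Bool))) (cat : String) : Int :=
  match PySem.Dict.get? (PySem.Dict.mk category_types) cat with
  | none => 5
  | some types =>
    if PySem.Dict.getD (PySem.Dict.mk types) "is_animate" false then 0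
    else if PySem.Dict.getD (PySem.Dict.mk types) "is_bodypart" false then 1
    else if PySem.Dict.getD (PySem.Dict.mk types) "is_place" false then 2
    else if PySem.Dict.getD (PySem.Dict.mk types) "is_big" false then 3
    else if PySem.Dict.getD (PySem.Dict.mk types) "is_small" false then 4
    else 5

def sort_categories_alt (categories : List String) (category_types : List (String × List (String × Bool))) : List String :=
  PySem.List.sorted2 categories (rank_alt category_types) (fun c => c) false

-- ===== PRECONDITION & SPEC =====
-- one type dict, read left to right exactly as A's elif cascade reads it: each key A would
-- look up must be present (a missing key raises KeyError in Python A, and in B too)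
def okCascadeB (types : List (String × Bool)) : Bool :=
  ((PySem.Dict.mk types).get? "is_animate").isSome && (PySem.Dict.getD (PySem.Dict.mk types) "is_animate" false ||
  (((PySem.Dict.mk types).get? "is_bodypart").isSome && (PySem.Dict.getD (PySem.Dict.mk types) "is_bodypart" false ||
  (((PySem.Dict.mk types).get? "is_place").isSome && (PySem.Dict.getD (PySem.Dict.mk types) "is_place" false ||
  (((PySem.Dict.mk types).get? "is_big").isSome && (PySem.Dict.getD (PySem.Dict.mk types) "is_big" false ||
  ((PySem.Dict.mk types).get? "is_small").isSome)))))))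

-- Pre_ excludes exactly the inputs on which Python A raises KeyError: some listed category's
-- type dict is missing one of the is_* keys the elif cascade actually reads there.
def Pre_sort_categories (categories : List String) (category_types : List (String × List (String × Bool))) : Prop :=
  (categories.all (fun cat =>
    match PySem.Dict.get? (PySem.Dict.mk category_types) cat with
    | none => true
    | some types => okCascadeB types)) = true

instance (categories : List String) (category_types : List (String × List (String × Bool))) : Decidable (Pre_sort_categories categories category_types) := by unfold Pre_sort_categories; infer_instance

def pvWitness_sort_categories : List String × (List (String × List (String × Bool))) :=
  (["dog", "ball", "dog"], [("dog", [("is_animate", true)]), ("ball", [("is_animate", false), ("is_bodypart", false), ("is_place", false), ("is_big", false), ("is_small", true)])])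

def Spec_sort_categories (categories : List String) (category_types : List (String × List (String × Bool))) (out : List String) : Prop := out = sort_categories_alt categories category_types
instance (categories : List String) (category_types : List (String × List (String × Bool))) (out : List String) : Decidable (Spec_sort_categories categories category_types out) := by unfold Spec_sort_categories; infer_instance

-- ===== CLAIM (what is proved, stated in full; the proofs are below) =====
def Claim_equal_sort_categories : Prop := ∀ (categories : List String) (category_types : List (String × List (String × Bool))), Dom_sort_categories categories category_types → Pre_sort_categories categories category_types → Spec_sort_categories categories category_types (sort_categories categories category_types)

-- ===== LEMMAS AND PROOFS =====

-- the strict "before" test of B's keyed sort: lexicographic on (k s, s)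
def lexB (k : String → Int) (a b : String) : Bool :=
  decide (k a < k b) || (!decide (k b < k a) && decide (a < b))

theorem lexB_true_iff (k : String → Int) (a b : String) :
    lexB k a b = true ↔ k a < k b ∨ (k a ≤ k b ∧ a < b) := by
  simp [lexB, not_lt]

theorem lexB_false_iff (k : String → Int) (a b : String) :
    lexB k a b = false ↔ ¬(k a < k b ∨ (k a ≤ k b ∧ a < b)) := by
  rw [← lexB_true_iff]
  simp

theorem lexB_asymm (k : String → Int) (a b : String) (h : lexB k a b = true) :
    lexB k b a = false := by
  rw [lexB_true_iff] at h
  rw [lexB_false_iff]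
  rcases h with h | ⟨h1, h2⟩
  · rintro (h' | ⟨h1', h2'⟩) <;> omega
  · rintro (h' | ⟨h1', h2'⟩)
    · omega
    · exact absurd h2 (not_lt.mpr h2'.le)

theorem lexB_trans (k : String → Int) (a b c : String)
    (hab : lexB k a b = true) (hbc : lexB k b c = true) : lexB k a c = true := by
  rw [lexB_true_iff] at hab hbc ⊢
  rcases hab with h | ⟨h1, h2⟩ <;> rcases hbc with h' | ⟨h1', h2'⟩
  · exact Or.inl (lt_trans h h')
  · exact Or.inl (lt_of_lt_of_le h h1')
  · exact Or.inl (lt_of_le_of_lt h1 h')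
  · exact Or.inr ⟨le_trans h1 h1', lt_trans h2 h2'⟩

theorem lexB_antisymm (k : String → Int) (a b : String)
    (hab : lexB k a b = false) (hba : lexB k b a = false) : a = b := by
  rw [lexB_false_iff] at hab hba
  push Not at hab hba
  have hk : k a = k b := le_antisymm hba.1 hab.1
  exact le_antisymm (hba.2 hk.ge) (hab.2 hk.le)

theorem insertBy_lexB_pairwise (k : String → Int) (x : String) (ys : List String)
    (h : List.Pairwise (fun a b => lexB k b a = false) ys) :
    List.Pairwise (fun a b => lexB k b a = false) (PySem.List.insertBy (lexB k) x ys) := by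
  induction ys with
  | nil => simp [PySem.List.insertBy]
  | cons y t ih =>
    rw [List.pairwise_cons] at h
    by_cases hxy : lexB k x y = true
    · simp only [PySem.List.insertBy, hxy, if_true]
      constructor
      · intro z hz
        rcases List.mem_cons.mp hz with rfl | hz
        · exact lexB_asymm k x z hxy
        · by_contra hzx
          have hzx' : lexB k z x = true := by
            cases hzx' : lexB k z x with
            | true => rfl
            | false => exact absurd hzx' hzx
          have := lexB_trans k z x y hzx' hxy
          have h2 := h.1 z hz
          rw [h2] at this; exact Bool.false_ne_true this
      · exact List.pairwise_cons.mpr h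
    · have hxy' : lexB k x y = false := by
        cases hv : lexB k x y with
        | true => exact absurd hv hxy
        | false => rfl
      simp only [PySem.List.insertBy, hxy', Bool.false_eq_true, if_false]
      constructor
      · intro z hz
        rcases (PySem.List.mem_insertBy (lexB k) x z t).mp hz with rfl | hz
        · exact hxy'
        · exact h.1 z hz
      · exact ih h.2

theorem foldl_insertBy_pairwise (k : String → Int) (xs : List String) (acc : List String)
    (h : List.Pairwise (fun a b => lexB k b a = false) acc) :
    List.Pairwise (fun a b => lexB k b a = false)
      (xs.foldl (fun acc x => PySem.List.insertBy (lexB k) x acc) acc) := by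
  induction xs generalizing acc with
  | nil => exact h
  | cons x t ih => exact ih _ (insertBy_lexB_pairwise k x acc h)

theorem alt_eq_foldl (categories : List String) (category_types : List (String × List (String × Bool))) :
    sort_categories_alt categories category_types =
    categories.foldl (fun acc x => PySem.List.insertBy (lexB (rank_alt category_types)) x acc) [] := rfl

theorem alt_pairwise (categories : List String) (category_types : List (String × List (String × Bool))) :
    List.Pairwise (fun a b => lexB (rank_alt category_types) b a = false)
      (sort_categories_alt categories category_types) := by
  rw [alt_eq_foldl]
  exact foldl_insertBy_pairwise _ _ [] (List.Pairwise.nil)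

theorem rank_cases (category_types : List (String × List (String × Bool))) (c : String) :
    rank_alt category_types c = 0 ∨ rank_alt category_types c = 1 ∨ rank_alt category_types c = 2 ∨
    rank_alt category_types c = 3 ∨ rank_alt category_types c = 4 ∨ rank_alt category_types c = 5 := by
  unfold rank_alt
  rcases PySem.Dict.get? (PySem.Dict.mk category_types) c with _ | types
  · simp
  · dsimp only
    split_ifs <;> simp

-- after A's loop, each bucket is exactly the sublist of categories with that rank
theorem foldl_stepA (category_types : List (String × List (String × Bool))) (cats : List String)
    (an bp pl bg sm ot : List String) :
    cats.foldl (stepA category_types) (an, bp, pl, bg, sm, ot) =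
    (an ++ cats.filter (fun c => rank_alt category_types c == 0),
     bp ++ cats.filter (fun c => rank_alt category_types c == 1),
     pl ++ cats.filter (fun c => rank_alt category_types c == 2),
     bg ++ cats.filter (fun c => rank_alt category_types c == 3),
     sm ++ cats.filter (fun c => rank_alt category_types c == 4),
     ot ++ cats.filter (fun c => rank_alt category_types c == 5)) := by
  induction cats generalizing an bp pl bg sm ot with
  | nil => simp
  | cons c cs ih =>
    rw [List.foldl_cons]
    rcases h : PySem.Dict.get? (PySem.Dict.mk category_types) c with _ | types
    · simp only [stepA, h]
      rw [ih]
      simp [rank_alt, h]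
    · simp only [stepA, h]
      by_cases h0 : PySem.Dict.getD (PySem.Dict.mk types) "is_animate" false = true
      · simp only [h0, if_true]
        rw [ih]; simp [rank_alt, h, h0]
      · by_cases h1 : PySem.Dict.getD (PySem.Dict.mk types) "is_bodypart" false = true
        · simp only [h0, h1, if_true, Bool.false_eq_true, if_false]
          rw [ih]; simp [rank_alt, h, h0, h1]
        · by_cases h2 : PySem.Dict.getD (PySem.Dict.mk types) "is_place" false = true
          · simp only [h0, h1, h2, if_true, Bool.false_eq_true, if_false]
            rw [ih]; simp [rank_alt, h, h0, h1, h2]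
          · by_cases h3 : PySem.Dict.getD (PySem.Dict.mk types) "is_big" false = true
            · simp only [h0, h1, h2, h3, if_true, Bool.false_eq_true, if_false]
              rw [ih]; simp [rank_alt, h, h0, h1, h2, h3]
            · by_cases h4 : PySem.Dict.getD (PySem.Dict.mk types) "is_small" false = true
              · simp only [h0, h1, h2, h3, h4, if_true, Bool.false_eq_true, if_false]
                rw [ih]; simp [rank_alt, h, h0, h1, h2, h3, h4]
              · simp only [h0, h1, h2, h3, h4, Bool.false_eq_true, if_false]
                rw [ih]; simp [rank_alt, h, h0, h1, h2, h3, h4]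

theorem filters_perm (category_types : List (String × List (String × Bool))) (cats : List String) :
    (cats.filter (fun c => rank_alt category_types c == 0) ++
     cats.filter (fun c => rank_alt category_types c == 1) ++
     cats.filter (fun c => rank_alt category_types c == 2) ++
     cats.filter (fun c => rank_alt category_types c == 3) ++
     cats.filter (fun c => rank_alt category_types c == 4) ++
     cats.filter (fun c => rank_alt category_types c == 5)).Perm cats := by
  rw [List.perm_iff_count]
  intro a
  have hc : ∀ (i : Int), List.count a (cats.filter (fun c => rank_alt category_types c == i)) =
      if rank_alt category_types a = i then List.count a cats else 0 := by
    intro i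
    by_cases hi : rank_alt category_types a = i
    · rw [if_pos hi, List.count_filter]
      simp [hi]
    · rw [if_neg hi, List.count_eq_zero]
      intro hmem
      exact hi (by simpa using (List.mem_filter.mp hmem).2)
  simp only [List.count_append, hc]
  rcases rank_cases category_types a with h | h | h | h | h | h <;> simp [h]

-- sorted bucket of rank i: internally name-ordered, so Pairwise for the lex relation
theorem block_pairwise (k : String → Int) (i : Int) (g : List String)
    (hg : ∀ x ∈ g, k x = i) :
    List.Pairwise (fun a b => lexB k b a = false) (PySem.List.sorted g (fun x => x) false) := by
  have hp := PySem.List.sorted_pairwise g (fun x => x)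
  refine hp.imp_of_mem ?_
  intro a b ha hb hab
  rw [lexB_false_iff]
  have hka : k a = i := hg a ((PySem.List.mem_sorted g (fun x => x) false a).mp ha)
  have hkb : k b = i := hg b ((PySem.List.mem_sorted g (fun x => x) false b).mp hb)
  rintro (h | ⟨h1, h2⟩)
  · omega
  · exact absurd h2 (not_lt.mpr hab)

theorem cross_false (k : String → Int) (a b : String) (h : k a < k b) : lexB k b a = false := by
  rw [lexB_false_iff]
  rintro (h' | ⟨h1, h2⟩) <;> omega

theorem a_perm (categories : List String) (category_types : List (String × List (String × Bool))) :
    (sort_categories categories category_types).Perm categories := by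
  unfold sort_categories
  rw [foldl_stepA]
  simp only [List.nil_append]
  refine List.Perm.trans ?_ (filters_perm category_types categories)
  exact ((((((PySem.List.sorted_perm _ _ _).append (PySem.List.sorted_perm _ _ _)).append
    (PySem.List.sorted_perm _ _ _)).append (PySem.List.sorted_perm _ _ _)).append
    (PySem.List.sorted_perm _ _ _)).append (PySem.List.sorted_perm _ _ _))

theorem a_pairwise (categories : List String) (category_types : List (String × List (String × Bool))) :
    List.Pairwise (fun a b => lexB (rank_alt category_types) b a = false)
      (sort_categories categories category_types) := by
  unfold sort_categories
  rw [foldl_stepA]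
  simp only [List.nil_append]
  have hrank : ∀ (i : Int) (x : String),
      x ∈ PySem.List.sorted (categories.filter (fun c => rank_alt category_types c == i)) (fun x => x) false →
      rank_alt category_types x = i := by
    intro i x hx
    simpa using (List.mem_filter.mp ((PySem.List.mem_sorted _ _ _ x).mp hx)).2
  have hblk : ∀ (i : Int),
      List.Pairwise (fun a b => lexB (rank_alt category_types) b a = false)
        (PySem.List.sorted (categories.filter (fun c => rank_alt category_types c == i)) (fun x => x) false) :=
    fun i => block_pairwise _ i _ (fun x hx => by simpa using (List.mem_filter.mp hx).2)
  have h45 := List.pairwise_append.mpr ⟨hblk 4, hblk 5, fun a ha b hb =>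
    cross_false _ a b (by rw [hrank 4 a ha, hrank 5 b hb]; norm_num)⟩
  have h345 := List.pairwise_append.mpr ⟨hblk 3, h45, fun a ha b hb =>
    cross_false _ a b (by
      rcases List.mem_append.mp hb with hb | hb
      · rw [hrank 3 a ha, hrank 4 b hb]; norm_num
      · rw [hrank 3 a ha, hrank 5 b hb]; norm_num)⟩
  have h2345 := List.pairwise_append.mpr ⟨hblk 2, h345, fun a ha b hb =>
    cross_false _ a b (by
      rcases List.mem_append.mp hb with hb | hb
      · rw [hrank 2 a ha, hrank 3 b hb]; norm_num
      rcases List.mem_append.mp hb with hb | hb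
      · rw [hrank 2 a ha, hrank 4 b hb]; norm_num
      · rw [hrank 2 a ha, hrank 5 b hb]; norm_num)⟩
  have h12345 := List.pairwise_append.mpr ⟨hblk 1, h2345, fun a ha b hb =>
    cross_false _ a b (by
      rcases List.mem_append.mp hb with hb | hb
      · rw [hrank 1 a ha, hrank 2 b hb]; norm_num
      rcases List.mem_append.mp hb with hb | hb
      · rw [hrank 1 a ha, hrank 3 b hb]; norm_num
      rcases List.mem_append.mp hb with hb | hb
      · rw [hrank 1 a ha, hrank 4 b hb]; norm_num
      · rw [hrank 1 a ha, hrank 5 b hb]; norm_num)⟩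
  have h012345 := List.pairwise_append.mpr ⟨hblk 0, h12345, fun a ha b hb =>
    cross_false _ a b (by
      rcases List.mem_append.mp hb with hb | hb
      · rw [hrank 0 a ha, hrank 1 b hb]; norm_num
      rcases List.mem_append.mp hb with hb | hb
      · rw [hrank 0 a ha, hrank 2 b hb]; norm_num
      rcases List.mem_append.mp hb with hb | hb
      · rw [hrank 0 a ha, hrank 3 b hb]; norm_num
      rcases List.mem_append.mp hb with hb | hb
      · rw [hrank 0 a ha, hrank 4 b hb]; norm_num
      · rw [hrank 0 a ha, hrank 5 b hb]; norm_num)⟩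
  simpa [List.append_assoc] using h012345

-- ===== VERDICT (by name: the statement is the Claim_ definition above) =====
theorem sort_categories_spec : Claim_equal_sort_categories := by
  intro categories category_types _ _
  unfold Spec_sort_categories
  have hperm : (sort_categories categories category_types).Perm (sort_categories_alt categories category_types) :=
    (a_perm categories category_types).trans (PySem.List.sorted2_perm _ _ _ _).symm
  exact List.Perm.eq_of_pairwise
    (fun a b _ _ h1 h2 => lexB_antisymm (rank_alt category_types) a b h2 h1)
    (a_pairwise categories category_types)
    (alt_pairwise categories category_types)
    hperm
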